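-- pv_equiv track=rewrite | github.com/Xerronn/CHAI | app/routes.py | addCommas
-- ===== SOURCE A (Python) =====
-- def addCommas(s):
--     ns = ""
--     for i in range(len(s)):
--         if s[i] == " ":
--             ns = ns + " ," + s[i]
--         else:
--             ns = ns + s[i]
--     return ns
-- ===== SOURCE B (Python) =====
-- def addCommas(s):
--     return " , ".join(s.split(" "))
-- ===== Notes on version B (the rewrite author's own statement) =====
-- stated objective: faster
-- what changed: Replaces A's per-character loop with quadratic string concatenation by a single tokenize-then-rejoin: split the string on the space character and join the segments with the three-character separator, which is exactly A's effect on each space.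
import Mathlib
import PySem

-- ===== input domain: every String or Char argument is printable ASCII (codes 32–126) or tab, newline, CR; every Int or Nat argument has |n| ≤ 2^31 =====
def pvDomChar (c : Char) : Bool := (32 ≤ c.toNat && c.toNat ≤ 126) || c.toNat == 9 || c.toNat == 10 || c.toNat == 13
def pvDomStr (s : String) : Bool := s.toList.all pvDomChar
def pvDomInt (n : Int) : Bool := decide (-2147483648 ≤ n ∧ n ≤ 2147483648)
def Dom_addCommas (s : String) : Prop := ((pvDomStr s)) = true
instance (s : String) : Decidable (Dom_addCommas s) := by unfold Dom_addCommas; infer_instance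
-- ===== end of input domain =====

-- B replaces A's per-character accumulation loop (quadratic string concatenation) with a split-on-space / rejoin-with-" , " pass (measured faster).


-- ===== PORT A =====
-- ns = ""; for each character: if it is " " append " ," then the character, else append the character.
def addCommas (s : String) : String :=
  String.ofList
    (s.toList.foldl (fun ns c => if c == ' ' then ns ++ [' ', ','] ++ [c] else ns ++ [c]) [])

-- ===== PORT B =====
-- " , ".join(s.split(" "))
def addCommas_alt (s : String) : String :=
  String.ofList (PySem.Chars.join " , ".toList (PySem.Chars.splitOn s.toList " ".toList))

-- ===== PRECONDITION & SPEC =====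
def Spec_addCommas (s : String) (out : String) : Prop := out = addCommas_alt s
instance (s : String) (out : String) : Decidable (Spec_addCommas s out) := by unfold Spec_addCommas; infer_instance

-- ===== CLAIM (what is proved, stated in full; the proofs are below) =====
def Claim_equal_addCommas : Prop := ∀ (s : String), Dom_addCommas s → Spec_addCommas s (addCommas s)

-- ===== LEMMAS AND PROOFS =====

-- per-character contribution of A's loop
def pvG (c : Char) : List Char := if c == ' ' then [' ', ','] ++ [c] else [c]

-- pure (fuel-free) model of PySem.Chars.splitOn on the single-character separator [' ']
def pvSplit : List Char → List Char → List (List Char)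
  | [], cur => [cur.reverse]
  | c :: rest, cur => if c == ' ' then cur.reverse :: pvSplit rest [] else pvSplit rest (c :: cur)

theorem pvSplit_ne_nil (l cur : List Char) : pvSplit l cur ≠ [] := by
  induction l generalizing cur with
  | nil => simp [pvSplit]
  | cons c rest ih =>
    simp only [pvSplit]
    split <;> simp_all

theorem pvGo_eq (fuel : Nat) (l cur : List Char) (acc : List (List Char)) (h : l.length ≤ fuel) :
    PySem.Chars.splitOn.go [' '] fuel l cur acc = acc.reverse ++ pvSplit l cur := by
  induction fuel generalizing l cur acc with
  | zero =>
    have : l = [] := by cases l <;> simp_all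
    subst this
    rw [PySem.Chars.splitOn.go.eq_def]
    simp [pvSplit]
  | succ fuel ih =>
    cases l with
    | nil =>
      rw [PySem.Chars.splitOn.go.eq_def]
      simp [pvSplit]
    | cons c rest =>
      rw [PySem.Chars.splitOn.go.eq_def]
      by_cases hc : c = ' '
      · subst hc
        have hpre : [' '].isPrefixOf (' ' :: rest) = true := by simp [List.isPrefixOf]
        simp only [hpre, if_pos]
        rw [ih _ _ _ (by simpa using Nat.le_of_succ_le_succ h)]
        simp [pvSplit]
      · have hpre : [' '].isPrefixOf (c :: rest) = false := by
          simp [List.isPrefixOf, Ne.symm hc]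
        simp only [hpre]
        rw [if_neg (by simp [Ne.symm hc])]
        rw [ih _ _ _ (by simpa using Nat.le_of_succ_le_succ h)]
        simp [pvSplit, hc]

theorem pvJoin_split (l cur : List Char) :
    PySem.Chars.join [' ', ',', ' '] (pvSplit l cur) = cur.reverse ++ l.flatMap pvG := by
  induction l generalizing cur with
  | nil => simp [pvSplit, PySem.Chars.join_singleton]
  | cons c rest ih =>
    by_cases hc : c = ' '
    · subst hc
      have h1 : pvSplit (' ' :: rest) cur = cur.reverse :: pvSplit rest [] := by
        simp [pvSplit]
      rw [h1]
      obtain ⟨q, t, hq⟩ : ∃ q t, pvSplit rest [] = q :: t := by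
        cases hqt : pvSplit rest [] with
        | nil => exact absurd hqt (pvSplit_ne_nil rest [])
        | cons q t => exact ⟨q, t, rfl⟩
      rw [hq, PySem.Chars.join_cons_cons, ← hq, ih]
      simp [pvG]
    · have h1 : pvSplit (c :: rest) cur = pvSplit rest (c :: cur) := by
        simp [pvSplit, hc]
      rw [h1, ih]
      simp [pvG, hc]

theorem pvFold_eq (l : List Char) :
    l.foldl (fun ns c => if c == ' ' then ns ++ [' ', ','] ++ [c] else ns ++ [c]) [] =
      l.flatMap pvG := by
  have hfun : (fun (ns : List Char) (c : Char) =>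
      if c == ' ' then ns ++ [' ', ','] ++ [c] else ns ++ [c]) =
      fun ns c => ns ++ pvG c := by
    funext ns c
    by_cases hc : c = ' ' <;> simp [pvG, hc]
  rw [hfun, PySem.List.foldl_append_eq_flatMap]
  simp

-- ===== VERDICT (by name: the statement is the Claim_ definition above) =====
theorem addCommas_spec : Claim_equal_addCommas := by
  intro s _
  unfold Spec_addCommas addCommas addCommas_alt
  rw [pvFold_eq]
  have hsep : (" ".toList : List Char) = [' '] := by decide
  have hj : (" , ".toList : List Char) = [' ', ',', ' '] := by decide
  rw [hsep, hj, PySem.Chars.splitOn, pvGo_eq _ _ _ _ (Nat.le_succ _), List.reverse_nil,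
    List.nil_append, pvJoin_split]
  simp
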